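-- pv_equiv track=rewrite | github.com/duressa2022/leetcode-solutions | leet-code-solutions/leetcode/all-divisions-with-the-highest-score-of-a-binary-array.py | maxScoreIndices
-- ===== SOURCE A (Python) =====
-- from typing import List
--
-- def maxScoreIndices(nums: List[int]) -> List[int]:
--   zeros = nums.count(0)
--   ones = len(nums) - zeros
--   result = [0]
--   left_zeros = 0
--   left_ones = 0
--   max_score = ones
--
--   for i, num in enumerate(nums):
--     left_zeros += num == 0
--     left_ones += num == 1
--     right_ones = ones - left_ones
--     score = left_zeros + right_ones
--     if max_score == score:
--       result.append(i + 1)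
--     elif max_score < score:
--       max_score = score
--       result = [i + 1]
--
--   return result
-- ===== SOURCE B (Python) =====
-- from typing import List
--
-- def maxScoreIndices(nums: List[int]) -> List[int]:
--     ones = len(nums) - nums.count(0)
--     scores = [ones]
--     z = 0
--     o = 0
--     for x in nums:
--         z += x == 0
--         o += x == 1
--         scores.append(z + (ones - o))
--     m = max(scores)
--     return [j for j, s in enumerate(scores) if s == m]
-- ===== Notes on version B (the rewrite author's own statement) =====
-- stated objective: alternative
-- what changed: B materializes the full length-(n+1) table of split scores in one pass, then computes the maximum and collects all argmax indices in separate max/filter passes, instead of A's fused scan that tracks the running maximum and rebuilds/extends the result list inline.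
import Mathlib
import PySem

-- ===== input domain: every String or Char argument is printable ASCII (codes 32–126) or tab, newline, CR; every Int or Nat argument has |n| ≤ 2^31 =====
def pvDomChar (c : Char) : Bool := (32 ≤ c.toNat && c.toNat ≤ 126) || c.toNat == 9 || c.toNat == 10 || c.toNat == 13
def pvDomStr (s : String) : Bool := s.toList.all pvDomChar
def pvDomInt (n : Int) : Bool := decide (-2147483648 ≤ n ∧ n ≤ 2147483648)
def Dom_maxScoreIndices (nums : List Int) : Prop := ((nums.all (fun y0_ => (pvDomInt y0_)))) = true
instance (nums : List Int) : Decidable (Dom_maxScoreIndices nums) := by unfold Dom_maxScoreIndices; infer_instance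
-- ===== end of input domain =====

-- B replaces A's fused max-tracking scan by building the full table of split scores,
-- then taking max and filtering for argmax indices (objective: alternative decomposition).

-- ===== PORT A =====
-- loop body of A's for-loop; state = (left_zeros, left_ones, max_score, result)
def stepA (ones : Int) (st : Int × Int × Int × List Int) (p : Int × Int) :
    Int × Int × Int × List Int :=
  let lz := st.1 + (if p.2 == 0 then 1 else 0)
  let lo := st.2.1 + (if p.2 == 1 then 1 else 0)
  let score := lz + (ones - lo)
  if st.2.2.1 == score then (lz, lo, st.2.2.1, st.2.2.2 ++ [p.1 + 1])
  else if st.2.2.1 < score then (lz, lo, score, [p.1 + 1])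
  else (lz, lo, st.2.2.1, st.2.2.2)

def maxScoreIndices (nums : List Int) : List Int :=
  let zeros : Int := nums.count 0
  let ones : Int := (nums.length : Int) - zeros
  let st := (PySem.List.enumerate nums 0).foldl (stepA ones) (0, 0, ones, [0])
  st.2.2.2

-- ===== PORT B =====
-- loop body of B's table-building loop; state = (z, o, scores so far)
def stepB (ones : Int) (st : Int × Int × List Int) (x : Int) : Int × Int × List Int :=
  let z := st.1 + (if x == 0 then 1 else 0)
  let o := st.2.1 + (if x == 1 then 1 else 0)
  (z, o, st.2.2 ++ [z + (ones - o)])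

def maxScoreIndices_alt (nums : List Int) : List Int :=
  let ones : Int := (nums.length : Int) - (nums.count 0 : Int)
  let st := nums.foldl (stepB ones) (0, 0, [ones])
  let scores := st.2.2
  match PySem.List.max? scores (fun s => s) with
  | none => []  -- unreachable: scores is nonempty
  | some m => ((PySem.List.enumerate scores 0).filter (fun p => p.2 == m)).map (fun p => p.1)

-- ===== PRECONDITION & SPEC =====
def Spec_maxScoreIndices (nums : List Int) (out : List Int) : Prop := out = maxScoreIndices_alt nums
instance (nums : List Int) (out : List Int) : Decidable (Spec_maxScoreIndices nums out) := by unfold Spec_maxScoreIndices; infer_instance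

-- ===== CLAIM (what is proved, stated in full; the proofs are below) =====
def Claim_equal_maxScoreIndices : Prop := ∀ (nums : List Int), Dom_maxScoreIndices nums → Spec_maxScoreIndices nums (maxScoreIndices nums)

-- ===== LEMMAS AND PROOFS =====

-- the stream of split scores produced while scanning the list with counters z, o
def scoresFrom (ones z o : Int) : List Int → List Int
  | [] => []
  | x :: t =>
      let z' := z + (if x == 0 then 1 else 0)
      let o' := o + (if x == 1 then 1 else 0)
      (z' + (ones - o')) :: scoresFrom ones z' o' t

-- A's fused argmax scan, abstracted to act on the score stream
def runArg (k ms : Int) (res : List Int) : List Int → List Int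
  | [] => res
  | s :: t =>
      if ms == s then runArg (k + 1) ms (res ++ [k]) t
      else if ms < s then runArg (k + 1) s [k] t
      else runArg (k + 1) ms res t

theorem foldA_eq_runArg (ones : Int) (l : List Int) :
    ∀ (k z o ms : Int) (res : List Int),
      ((PySem.List.enumerate l k).foldl (stepA ones) (z, o, ms, res)).2.2.2
        = runArg (k + 1) ms res (scoresFrom ones z o l) := by
  induction l with
  | nil => intro k z o ms res; simp [PySem.List.enumerate_nil, scoresFrom, runArg]
  | cons x t ih =>
      intro k z o ms res
      simp only [PySem.List.enumerate_cons, List.foldl_cons, scoresFrom, runArg, stepA]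
      split_ifs <;> exact ih _ _ _ _ _

theorem foldB_eq_scoresFrom (ones : Int) (l : List Int) :
    ∀ (z o : Int) (acc : List Int),
      (l.foldl (stepB ones) (z, o, acc)).2.2 = acc ++ scoresFrom ones z o l := by
  induction l with
  | nil => intro z o acc; simp [scoresFrom]
  | cons x t ih => intro z o acc; simp [stepB, scoresFrom, ih]

theorem runArg_eq_filter (t : List Int) :
    ∀ (k ms : Int) (res : List Int),
      runArg k ms res t
        = (if ms == t.foldl max ms then res else [])
            ++ ((PySem.List.enumerate t k).filter
                  (fun p => p.2 == t.foldl max ms)).map (fun p => p.1) := by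
  induction t with
  | nil => intro k ms res; simp [runArg, PySem.List.enumerate_nil]
  | cons s t ih =>
      intro k ms res
      simp only [runArg, List.foldl_cons, PySem.List.enumerate_cons, List.filter_cons]
      by_cases h1 : (ms == s) = true
      · have hms : ms = s := by simpa using h1
        subst hms
        rw [if_pos h1, ih (k + 1) ms (res ++ [k])]
        simp only [max_self]
        by_cases h2 : (ms == t.foldl max ms) = true
        · simp [h2, List.append_assoc]
        · simp [h2]
      · have hne : ¬ ms = s := by simpa using h1
        by_cases h2 : ms < s
        · rw [if_neg h1, if_pos h2, ih (k + 1) s [k]]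
          have hmax : max ms s = s := max_eq_right (le_of_lt h2)
          simp only [hmax]
          have hsle : s ≤ t.foldl max s := (PySem.List.le_foldl_max t s).1
          have hmsne : ¬ (ms == t.foldl max s) = true := by
            simp only [beq_iff_eq]; intro h; omega
          by_cases h3 : (s == t.foldl max s) = true <;> simp [h3, hmsne]
        · rw [if_neg h1, if_neg h2, ih (k + 1) ms res]
          have hmax : max ms s = ms := max_eq_left (by omega)
          simp only [hmax]
          have hmle : ms ≤ t.foldl max ms := (PySem.List.le_foldl_max t ms).1
          have hsne : ¬ (s == t.foldl max ms) = true := by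
            simp only [beq_iff_eq]; intro h; omega
          simp [hsne]

theorem foldl_max_eq_max? (t : List Int) (s0 : Int) :
    PySem.List.max? (s0 :: t) (fun s => s) = some (t.foldl max s0) := by
  cases hm : PySem.List.max? (s0 :: t) (fun s => s) with
  | none =>
      exact absurd hm (by simp [PySem.List.max?_eq_none_iff])
  | some m =>
      have hmem : m ∈ s0 :: t := PySem.List.max?_mem hm
      have hmax : ∀ y ∈ s0 :: t, y ≤ m := fun y hy => PySem.List.max?_isMax hm y hy
      have h1 : t.foldl max s0 ≤ m := by
        rcases PySem.List.foldl_max_mem t s0 with h | h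
        · rw [h]; exact hmax s0 (by simp)
        · exact hmax _ (by simp [h])
      have h2 : m ≤ t.foldl max s0 := by
        rcases List.mem_cons.mp hmem with h | h
        · rw [h]; exact (PySem.List.le_foldl_max t s0).1
        · exact (PySem.List.le_foldl_max t s0).2 m h
      have : m = t.foldl max s0 := le_antisymm h2 h1
      rw [this]

-- ===== VERDICT (by name: the statement is the Claim_ definition above) =====
theorem maxScoreIndices_spec : Claim_equal_maxScoreIndices := by
  intro nums _
  unfold Spec_maxScoreIndices maxScoreIndices maxScoreIndices_alt
  simp only []
  rw [foldA_eq_runArg, foldB_eq_scoresFrom]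
  have hcons : (([(nums.length : Int) - (nums.count 0 : Int)] ++
        scoresFrom ((nums.length : Int) - (nums.count 0 : Int)) 0 0 nums : List Int))
      = ((nums.length : Int) - (nums.count 0 : Int)) ::
        scoresFrom ((nums.length : Int) - (nums.count 0 : Int)) 0 0 nums := rfl
  rw [hcons, foldl_max_eq_max?]
  set ones : Int := (nums.length : Int) - (nums.count 0 : Int) with hones
  set t := scoresFrom ones 0 0 nums with ht
  rw [runArg_eq_filter t (0 + 1) ones [0]]
  simp only [PySem.List.enumerate_cons, List.filter_cons, zero_add]
  by_cases h : (ones == t.foldl max ones) = true <;> simp [h]
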